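-- pv_equiv track=rewrite | github.com/bejohi/MorphBust | morph_bust/lbp_calculate.py | is_lbp_pattern_morph_relevant
-- ===== SOURCE A (Python) =====
-- def is_lbp_pattern_morph_relevant(lbp_pattern: list):
--     """ Only lpb-pattern with exact 2 1s, where both 1s are direct neighbours, are relevant, e.g. [0,1,1,0,0,0,0,0]."""
--     sum_of_1s = 0
--     has_neighbours = False
--     for index in range(len(lbp_pattern)):
--         sum_of_1s += lbp_pattern[index]
--         if sum_of_1s > 2:
--             return False
--         if lbp_pattern[index] == 1 and lbp_pattern[index - 1] == 1:
--             has_neighbours = True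
--     return has_neighbours
-- ===== SOURCE B (Python) =====
-- def is_lbp_pattern_morph_relevant(lbp_pattern: list):
--     """Two separate passes: prefix-sum budget check, then circular-adjacency check via a rotation."""
--     running = 0
--     for value in lbp_pattern:
--         running += value
--         if running > 2:
--             return False
--     rotated = lbp_pattern[-1:] + lbp_pattern[:-1]
--     return any(a == 1 and b == 1 for a, b in zip(rotated, lbp_pattern))
-- ===== Notes on version B (the rewrite author's own statement) =====
-- stated objective: idiomatic
-- what changed: Replaces the fused index loop (prefix sum + circular index-1 adjacency + flag) by two separate passes: a prefix-sum budget check over element values, then an any() over zip of the list with its one-step rotation, removing all index arithmetic and the flag.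
import Mathlib
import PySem

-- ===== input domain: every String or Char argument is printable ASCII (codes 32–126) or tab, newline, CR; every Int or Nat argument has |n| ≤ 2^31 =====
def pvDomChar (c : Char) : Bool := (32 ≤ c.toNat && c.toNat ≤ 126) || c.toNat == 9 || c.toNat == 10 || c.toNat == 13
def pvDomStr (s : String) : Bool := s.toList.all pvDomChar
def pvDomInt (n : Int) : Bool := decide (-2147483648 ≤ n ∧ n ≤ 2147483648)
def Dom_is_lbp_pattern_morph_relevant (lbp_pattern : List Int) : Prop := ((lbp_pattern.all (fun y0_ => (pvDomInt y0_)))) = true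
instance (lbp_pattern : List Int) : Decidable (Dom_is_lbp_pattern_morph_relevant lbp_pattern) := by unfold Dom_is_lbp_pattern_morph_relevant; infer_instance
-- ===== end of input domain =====

-- B replaces A's fused index loop by two separate passes (prefix-sum budget check, then an
-- adjacency scan of the list zipped with its one-step rotation); same cost, more idiomatic.

-- ===== PORT A =====
-- A's for-loop over range(len(lbp_pattern)): structural recursion on the remaining suffix,
-- carrying the Python index (for lbp_pattern[index - 1], ported with pyGet?), sum_of_1s
-- and has_neighbours; 'return False' is the false-branch that stops recursing.
def pvAloop (lbp : List Int) : Nat → List Int → Int → Bool → Bool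
  | _, [], _, has_neighbours => has_neighbours
  | index, x :: rest, sum_of_1s, has_neighbours =>
      let s := sum_of_1s + x
      if s > 2 then false
      else if x == 1 && (PySem.List.pyGet? lbp ((index : Int) - 1) == some 1) then
        pvAloop lbp (index + 1) rest s true
      else
        pvAloop lbp (index + 1) rest s has_neighbours

def is_lbp_pattern_morph_relevant (lbp_pattern : List Int) : Bool :=
  pvAloop lbp_pattern 0 lbp_pattern 0 false

-- ===== PORT B =====
-- first pass of Source B: running prefix sum, True as soon as it exceeds 2
def pvBprefix : List Int → Int → Bool
  | [], _ => false
  | v :: rest, running =>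
      let r := running + v
      if r > 2 then true else pvBprefix rest r

def is_lbp_pattern_morph_relevant_alt (lbp_pattern : List Int) : Bool :=
  if pvBprefix lbp_pattern 0 then false
  else
    let rotated := PySem.List.slice lbp_pattern (some (-1)) none ++
                   PySem.List.slice lbp_pattern none (some (-1))
    (rotated.zip lbp_pattern).any (fun p => p.1 == 1 && p.2 == 1)

-- ===== PRECONDITION & SPEC =====
def Spec_is_lbp_pattern_morph_relevant (lbp_pattern : List Int) (out : Bool) : Prop := out = is_lbp_pattern_morph_relevant_alt lbp_pattern
instance (lbp_pattern : List Int) (out : Bool) : Decidable (Spec_is_lbp_pattern_morph_relevant lbp_pattern out) := by unfold Spec_is_lbp_pattern_morph_relevant; infer_instance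

-- ===== CLAIM (what is proved, stated in full; the proofs are below) =====
def Claim_equal_is_lbp_pattern_morph_relevant : Prop := ∀ (lbp_pattern : List Int), Dom_is_lbp_pattern_morph_relevant lbp_pattern → Spec_is_lbp_pattern_morph_relevant lbp_pattern (is_lbp_pattern_morph_relevant lbp_pattern)

-- ===== LEMMAS AND PROOFS =====

-- circular-adjacency scan with an explicit "previous element" accumulator
def pvAdj : Int → List Int → Bool
  | _, [] => false
  | prev, x :: xs => (prev == 1 && x == 1) || pvAdj x xs

lemma pvAdj_zip (xs : List Int) (p : Int) :
    ((p :: xs.dropLast).zip xs).any (fun q => q.1 == 1 && q.2 == 1) = pvAdj p xs := by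
  induction xs generalizing p with
  | nil => rfl
  | cons x xs ih =>
      cases xs with
      | nil => simp [pvAdj]
      | cons y ys =>
          rw [List.dropLast_cons₂, List.zip_cons_cons, List.any_cons, ih x]
          simp [pvAdj]

lemma pvAloop_eq (lbp : List Int) (rest : List Int) :
    ∀ (i : Nat) (s : Int) (hn : Bool) (prev : Int),
      lbp.drop i = rest →
      (rest ≠ [] → PySem.List.pyGet? lbp ((i : Int) - 1) = some prev) →
      pvAloop lbp i rest s hn =
        if pvBprefix rest s then false else (hn || pvAdj prev rest) := by
  induction rest with
  | nil => intro i s hn prev _ _; simp [pvAloop, pvBprefix, pvAdj]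
  | cons x rest ih =>
      intro i s hn prev hdrop hprev
      have hprev' : PySem.List.pyGet? lbp ((i : Int) - 1) = some prev := hprev (by simp)
      have hx : lbp[i]? = some x := by
        have h := List.getElem?_drop (xs := lbp) (i := i) (j := 0)
        rw [hdrop] at h
        simpa using h.symm
      have hdrop' : lbp.drop (i + 1) = rest := by
        rw [← List.drop_drop, hdrop]
        rfl
      have hnext : rest ≠ [] → PySem.List.pyGet? lbp (((i + 1 : Nat) : Int) - 1) = some x := by
        intro _
        have he : ((i + 1 : Nat) : Int) - 1 = ((i : Nat) : Int) := by push_cast; ring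
        rw [he, PySem.List.pyGet?_natCast, hx]
      simp only [pvAloop, pvBprefix, pvAdj, hprev']
      by_cases hgt : s + x > 2
      · simp [hgt]
      · simp only [hgt, if_false]
        rw [ih (i + 1) (s + x) true x hdrop' hnext, ih (i + 1) (s + x) hn x hdrop' hnext]
        cases hb : pvBprefix rest (s + x) <;>
          cases hx1 : x == 1 <;> cases hp1 : prev == 1 <;>
            simp [hp1]

-- ===== VERDICT (by name: the statement is the Claim_ definition above) =====
theorem is_lbp_pattern_morph_relevant_spec : Claim_equal_is_lbp_pattern_morph_relevant := by
  intro lbp _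
  unfold Spec_is_lbp_pattern_morph_relevant is_lbp_pattern_morph_relevant
    is_lbp_pattern_morph_relevant_alt
  cases lbp with
  | nil => decide
  | cons x xs =>
      have hne : x :: xs ≠ [] := by simp
      have hlast : PySem.List.pyGet? (x :: xs) (((0 : Nat) : Int) - 1)
          = some ((x :: xs).getLast hne) := by
        rw [show ((0 : Nat) : Int) - 1 = (-1 : Int) by ring, PySem.List.pyGet?_neg_one,
          List.getLast?_eq_some_getLast hne]
      rw [pvAloop_eq (x :: xs) (x :: xs) 0 0 false ((x :: xs).getLast hne) rfl
        (fun _ => hlast)]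
      by_cases hb : pvBprefix (x :: xs) 0
      · simp [hb]
      · simp only [hb, Bool.false_or]
        rw [PySem.List.slice_from_neg_one, PySem.List.slice_to_neg_one,
          List.drop_length_sub_one hne]
        simp only [List.singleton_append]
        exact (pvAdj_zip (x :: xs) ((x :: xs).getLast hne)).symm
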